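-- pv_equiv track=rewrite | github.com/srv1n/editops-skills | skills/video-clipper/scripts/clip_director_subtitles.py | _extract_title_text
-- ===== SOURCE A (Python) =====
-- from typing import Any, Dict, List, Optional, Sequence, Tuple
--
-- def _extract_title_text(tokens: Sequence[str]) -> Optional[str]:
--     """
--     Best-effort listicle title extraction: "here are ten rules" -> "10 RULES"
--     """
--     window = [t for t in tokens[:14] if t]
--     if not window:
--         return None
--
--     number_words = {
--         "one": 1,
--         "two": 2,
--         "three": 3,
--         "four": 4,
--         "five": 5,
--         "six": 6,
--         "seven": 7,
--         "eight": 8,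
--         "nine": 9,
--         "ten": 10,
--         "eleven": 11,
--         "twelve": 12,
--         "thirteen": 13,
--         "fourteen": 14,
--         "fifteen": 15,
--         "sixteen": 16,
--         "seventeen": 17,
--         "eighteen": 18,
--         "nineteen": 19,
--         "twenty": 20,
--     }
--     nouns = {"rules", "ways", "tips", "things", "reasons", "lessons", "principles", "steps", "facts", "signs"}
--
--     def parse_n(tok: str) -> Optional[int]:
--         if not tok:
--             return None
--         if tok.isdigit():
--             try:
--                 v = int(tok)
--                 if 1 <= v <= 99:
--                     return v
--             except Exception:
--                 return None
--         return number_words.get(tok)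
--
--     for i, tok in enumerate(window):
--         n = parse_n(tok)
--         if n is None:
--             continue
--         for j in range(i + 1, min(len(window), i + 5)):
--             noun = window[j]
--             if noun in nouns:
--                 return f"{n} {noun.upper()}"
--     return None
-- ===== SOURCE B (Python) =====
-- from typing import Optional, Sequence
--
-- _NUMBER_WORDS = {
--     "one": 1, "two": 2, "three": 3, "four": 4, "five": 5,
--     "six": 6, "seven": 7, "eight": 8, "nine": 9, "ten": 10,
--     "eleven": 11, "twelve": 12, "thirteen": 13, "fourteen": 14,
--     "fifteen": 15, "sixteen": 16, "seventeen": 17, "eighteen": 18,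
--     "nineteen": 19, "twenty": 20,
-- }
-- _NOUNS = {"rules", "ways", "tips", "things", "reasons", "lessons",
--           "principles", "steps", "facts", "signs"}
--
--
-- def _parse_n(tok: str) -> Optional[int]:
--     if not tok:
--         return None
--     if tok.isdigit():
--         v = int(tok)
--         if 1 <= v <= 99:
--             return v
--     return _NUMBER_WORDS.get(tok)
--
--
-- def _extract_title_text(tokens: Sequence[str]) -> Optional[str]:
--     """Single left-to-right pass keeping a sliding window of recent numbers."""
--     window = [t for t in tokens[:14] if t]
--     q = []  # ascending (index, value) for number tokens at most 4 positions back
--     for j, tok in enumerate(window):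
--         q = [(k, v) for (k, v) in q if k >= j - 4]
--         if tok in _NOUNS:
--             if q:
--                 return f"{q[0][1]} {tok.upper()}"
--         else:
--             n = _parse_n(tok)
--             if n is not None:
--                 q.append((j, n))
--     return None
-- ===== Notes on version B (the rewrite author's own statement) =====
-- stated objective: alternative
-- what changed: A scans each number token and then re-scans up to 4 tokens ahead for a noun; B makes one left-to-right pass keeping a sliding queue of the number tokens seen at most 4 positions back and answers at the first noun with a number still in the window.
import Mathlib
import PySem

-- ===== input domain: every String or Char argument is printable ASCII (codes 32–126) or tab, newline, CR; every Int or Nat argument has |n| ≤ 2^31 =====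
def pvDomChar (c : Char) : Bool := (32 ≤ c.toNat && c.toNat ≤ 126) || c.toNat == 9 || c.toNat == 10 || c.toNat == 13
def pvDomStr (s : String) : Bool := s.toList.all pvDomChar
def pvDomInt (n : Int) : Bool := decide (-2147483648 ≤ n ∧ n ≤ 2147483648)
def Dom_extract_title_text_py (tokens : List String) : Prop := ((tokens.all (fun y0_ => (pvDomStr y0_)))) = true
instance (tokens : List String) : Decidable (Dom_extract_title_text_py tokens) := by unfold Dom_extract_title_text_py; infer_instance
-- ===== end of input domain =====

-- B replaces A's nested number-then-lookahead scan by a single left-to-right pass that keeps a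
-- sliding window of the number tokens seen at most 4 positions back (objective: alternative).

-- ===== shared table/helpers (identical constants in both Pythons) =====
def numberWords : PySem.Dict String Int := PySem.Dict.ofList
  [("one", 1), ("two", 2), ("three", 3), ("four", 4), ("five", 5), ("six", 6), ("seven", 7),
   ("eight", 8), ("nine", 9), ("ten", 10), ("eleven", 11), ("twelve", 12), ("thirteen", 13),
   ("fourteen", 14), ("fifteen", 15), ("sixteen", 16), ("seventeen", 17), ("eighteen", 18),
   ("nineteen", 19), ("twenty", 20)]

def nounsSet : PySem.Set String := PySem.Set.ofList
  ["rules", "ways", "tips", "things", "reasons", "lessons", "principles", "steps", "facts", "signs"]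

-- parse_n (textually identical in Source A and Source B)
def parseN (tok : String) : Option Int :=
  if tok = "" then none
  else if PySem.Str.strIsdigit tok then
    match PySem.Int.ofStr? tok with
    | some v => if 1 ≤ v ∧ v ≤ 99 then some v else PySem.Dict.get? numberWords tok
    | none => none            -- the 'except' path: return None
  else PySem.Dict.get? numberWords tok

-- ===== PORT A =====
-- inner loop: for j in range(i+1, min(len(window), i+5))
def aInner (w : List String) (n : Int) (stop : Nat) (j : Nat) : Option String :=
  if _h : j < stop then
    match PySem.List.pyGet? w (j : Int) with
    | some noun =>
      if PySem.Set.contains nounsSet noun then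
        some (PySem.Int.toStr n ++ " " ++ PySem.Str.upper noun)
      else aInner w n stop (j + 1)
    | none => none            -- unreachable: j < stop ≤ len w
  else none
termination_by stop - j

-- outer loop: for i, tok in enumerate(window), as an index recursion
def aOuter (w : List String) (i : Nat) : Option String :=
  if _h : i < w.length then
    match PySem.List.pyGet? w (i : Int) with
    | some tok =>
      match parseN tok with
      | none => aOuter w (i + 1)
      | some n =>
        match aInner w n (min w.length (i + 5)) (i + 1) with
        | some r => some r
        | none => aOuter w (i + 1)
    | none => none            -- unreachable: i < len w
  else none
termination_by w.length - i

def extract_title_text_py (tokens : List String) : Option String :=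
  let window := (PySem.List.slice tokens none (some 14)).filter (fun t => t ≠ "")
  if window = [] then none
  else aOuter window 0

-- ===== PORT B =====
-- single pass with the queue of recent numbers; 'k >= j - 4' over Python ints is 'j ≤ k + 4' over Nat
def bGo (w : List String) (q : List (Nat × Int)) (j : Nat) : Option String :=
  if _h : j < w.length then
    match PySem.List.pyGet? w (j : Int) with
    | some tok =>
      let q' := q.filter (fun kv => j ≤ kv.1 + 4)
      if PySem.Set.contains nounsSet tok then
        match q' with
        | (_, v0) :: _ => some (PySem.Int.toStr v0 ++ " " ++ PySem.Str.upper tok)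
        | [] => bGo w q' (j + 1)
      else
        match parseN tok with
        | some n => bGo w (q' ++ [(j, n)]) (j + 1)
        | none => bGo w q' (j + 1)
    | none => none            -- unreachable: j < len w
  else none
termination_by w.length - j

def extract_title_text_py_alt (tokens : List String) : Option String :=
  let window := (PySem.List.slice tokens none (some 14)).filter (fun t => t ≠ "")
  bGo window [] 0

-- ===== PRECONDITION & SPEC =====
def Spec_extract_title_text_py (tokens : List String) (out : Option String) : Prop := out = extract_title_text_py_alt tokens
instance (tokens : List String) (out : Option String) : Decidable (Spec_extract_title_text_py tokens out) := by unfold Spec_extract_title_text_py; infer_instance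

-- ===== CLAIM (what is proved, stated in full; the proofs are below) =====
def Claim_equal_extract_title_text_py : Prop := ∀ (tokens : List String), Dom_extract_title_text_py tokens → Spec_extract_title_text_py tokens (extract_title_text_py tokens)

-- ===== LEMMAS AND PROOFS =====

-- token at an index (out of range reads as "", which is neither a number nor a noun)
def tokAt (w : List String) (i : Nat) : String := w.getD i ""
def numAt (w : List String) (i : Nat) : Option Int := parseN (tokAt w i)
def isNoun (w : List String) (i : Nat) : Bool := PySem.Set.contains nounsSet (tokAt w i)

-- the first noun index in [j, stop)
def firstNoun (w : List String) (j stop : Nat) : Option Nat :=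
  if _h : j < stop then
    if isNoun w j then some j else firstNoun w (j + 1) stop
  else none
termination_by stop - j

-- the pair A finds: first i (≥ i0) that is a number with a noun ≤ 4 ahead, with its first such noun
def bestFrom (w : List String) (i : Nat) : Option (Nat × Nat) :=
  if _h : i < w.length then
    match numAt w i, firstNoun w (i + 1) (min w.length (i + 5)) with
    | some _, some j => some (i, j)
    | _, _ => bestFrom w (i + 1)
  else none
termination_by w.length - i

def render (w : List String) (p : Nat × Nat) : String :=
  PySem.Int.toStr ((numAt w p.1).getD 0) ++ " " ++ PySem.Str.upper (tokAt w p.2)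

def validPair (w : List String) (i j : Nat) : Prop :=
  (numAt w i).isSome ∧ isNoun w j = true ∧ i < j ∧ j ≤ i + 4

def goodI (w : List String) (i : Nat) : Prop :=
  (numAt w i).isSome ∧ (firstNoun w (i + 1) (min w.length (i + 5))).isSome

-- the queue contents: numbers k < j with j ≤ k + d, in ascending order of k
def recentQ (w : List String) (j d : Nat) : List (Nat × Int) :=
  (List.range j).filterMap (fun k => if j ≤ k + d then (numAt w k).map (fun v => (k, v)) else none)

theorem noun_not_empty : PySem.Set.contains nounsSet "" = false := by decide

theorem noun_not_num (t : String) (h : PySem.Set.contains nounsSet t = true) : parseN t = none := by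
  have hm : t ∈ (["rules", "ways", "tips", "things", "reasons", "lessons", "principles", "steps",
      "facts", "signs"] : List String) := by
    have := (PySem.Set.contains_iff (s := nounsSet) (x := t)).mp h
    simpa [nounsSet, PySem.Set.mem_ofList] using this
  fin_cases hm <;> decide

theorem isNoun_lt (w : List String) (j : Nat) (h : isNoun w j = true) : j < w.length := by
  by_contra hge
  have : tokAt w j = "" := by
    simp [tokAt, List.getD_eq_getElem?_getD, List.getElem?_eq_none (by omega : w.length ≤ j)]
  rw [isNoun, this, noun_not_empty] at h
  exact absurd h (by simp)

theorem tokAt_lt (w : List String) (j : Nat) (h : j < w.length) : tokAt w j = w[j] := by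
  simp [tokAt, List.getD_eq_getElem?_getD, List.getElem?_eq_getElem h]


-- ----- characterisation of firstNoun -----
theorem firstNoun_some_spec (w : List String) (stop : Nat) : ∀ j j', firstNoun w j stop = some j' →
    j ≤ j' ∧ j' < stop ∧ isNoun w j' = true ∧ ∀ t, j ≤ t → t < j' → isNoun w t = false := by
  intro j j' h
  fun_induction firstNoun w j stop with
  | case1 j h1 h2 =>
    obtain rfl : j = j' := by simpa using h
    exact ⟨le_refl _, h1, h2, fun t ht1 ht2 => absurd (lt_of_le_of_lt ht1 ht2) (lt_irrefl _)⟩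
  | case2 j h1 h2 ih =>
    obtain ⟨a, b, c, d⟩ := ih h
    refine ⟨by omega, b, c, fun t ht1 ht2 => ?_⟩
    rcases Nat.eq_or_lt_of_le ht1 with rfl | hlt
    · simpa using h2
    · exact d t (by omega) ht2
  | case3 j h1 => simp at h

theorem firstNoun_eq_some_intro (w : List String) (stop : Nat) : ∀ j j', j ≤ j' → j' < stop →
    isNoun w j' = true → (∀ t, j ≤ t → t < j' → isNoun w t = false) →
    firstNoun w j stop = some j' := by
  intro j j' hle hlt hnoun hmin
  fun_induction firstNoun w j stop with
  | case1 j h1 h2 =>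
    rcases Nat.eq_or_lt_of_le hle with rfl | hlt2
    · rfl
    · exact absurd h2 (by simp [hmin j (le_refl _) hlt2])
  | case2 j h1 h2 ih =>
    have hne : j ≠ j' := by rintro rfl; simp [hnoun] at h2
    exact ih (by omega) (fun t ht1 ht2 => hmin t (by omega) ht2)
  | case3 j h1 => omega

-- ----- characterisation of bestFrom -----
theorem bestFrom_eq_some_intro (w : List String) (i istar jstar : Nat) (hle : i ≤ istar)
    (hmin : ∀ t, i ≤ t → t < istar → ¬ goodI w t) (hnum : (numAt w istar).isSome)
    (hfn : firstNoun w (istar + 1) (min w.length (istar + 5)) = some jstar) :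
    bestFrom w i = some (istar, jstar) := by
  have hspec := firstNoun_some_spec w (min w.length (istar + 5)) (istar + 1) jstar hfn
  fun_induction bestFrom w i with
  | case1 i h1 v jj hfn2 hnum2 =>
    rcases Nat.eq_or_lt_of_le hle with rfl | hlt2
    · rw [hfn] at hfn2; cases hfn2; rfl
    · exact absurd ⟨by simp [hnum2], by simp [hfn2]⟩ (hmin i (le_refl _) hlt2)
  | case2 i h1 hfall ih =>
    have hne : i ≠ istar := by
      rintro rfl
      obtain ⟨x, hx⟩ := Option.isSome_iff_exists.mp hnum
      exact hfall x jstar hx hfn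
    exact ih (by omega) (fun t ht1 ht2 => hmin t (by omega) ht2)
  | case3 i h1 =>
    exfalso
    have : jstar < w.length := lt_of_lt_of_le hspec.2.1 (min_le_left _ _)
    omega

theorem bestFrom_eq_none_intro (w : List String) (i : Nat)
    (h : ∀ t, i ≤ t → ¬ goodI w t) : bestFrom w i = none := by
  fun_induction bestFrom w i with
  | case1 i h1 v jj hfn2 hnum2 => exact absurd ⟨by simp [hnum2], by simp [hfn2]⟩ (h i (le_refl _))
  | case2 i h1 hfall ih => exact ih (fun t ht => h t (by omega))
  | case3 i h1 => rfl

theorem valid_of_good (w : List String) (i : Nat) (h : goodI w i) : ∃ j, validPair w i j := by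
  obtain ⟨h1, h2⟩ := h
  obtain ⟨j, hj⟩ := Option.isSome_iff_exists.mp h2
  obtain ⟨a, b, c, _⟩ := firstNoun_some_spec w _ _ _ hj
  exact ⟨j, h1, c, by omega, by omega⟩

-- ----- ports versus the characterisations -----
theorem aInner_eq (w : List String) (n : Int) (stop : Nat) (hstop : stop ≤ w.length) : ∀ j,
    aInner w n stop j =
      (firstNoun w j stop).map (fun j' => PySem.Int.toStr n ++ " " ++ PySem.Str.upper (tokAt w j')) := by
  intro j
  fun_induction aInner w n stop j with
  | case1 j h1 noun hget hnoun =>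
    have hj : j < w.length := lt_of_lt_of_le h1 hstop
    have hn : w[j] = noun := by
      simpa [List.getElem?_eq_getElem hj] using hget
    have hnn : isNoun w j = true := by rw [isNoun, tokAt_lt w j hj, hn]; exact hnoun
    rw [firstNoun, dif_pos h1, if_pos hnn]
    simp [tokAt_lt w j hj, hn]
  | case2 j h1 noun hget hnoun ih =>
    have hj : j < w.length := lt_of_lt_of_le h1 hstop
    have hn : w[j] = noun := by
      simpa [List.getElem?_eq_getElem hj] using hget
    have hnn : ¬ (isNoun w j = true) := by rw [isNoun, tokAt_lt w j hj, hn]; exact hnoun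
    rw [firstNoun, dif_pos h1, if_neg hnn]
    exact ih
  | case3 j h1 hget =>
    have hj : j < w.length := lt_of_lt_of_le h1 hstop
    simp [List.getElem?_eq_getElem hj] at hget
  | case4 j h1 =>
    rw [firstNoun]; simp [h1]

theorem aOuter_eq (w : List String) : ∀ i, aOuter w i = (bestFrom w i).map (render w) := by
  intro i
  fun_induction aOuter w i with
  | case1 i h1 tok hget hpn ih =>
    -- parseN tok = none
    have ht : w[i] = tok := by simpa [List.getElem?_eq_getElem h1] using hget
    rw [bestFrom]
    simp only [dif_pos h1]
    have hnum : numAt w i = none := by rw [numAt, tokAt_lt w i h1, ht, hpn]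
    rw [hnum]
    cases hfn : firstNoun w (i + 1) (min w.length (i + 5)) <;> simpa using ih
  | case2 i h1 tok hget n hpn r hr =>
    -- aInner found r
    have ht : w[i] = tok := by simpa [List.getElem?_eq_getElem h1] using hget
    have hnum : numAt w i = some n := by rw [numAt, tokAt_lt w i h1, ht, hpn]
    have := aInner_eq w n (min w.length (i + 5)) (min_le_left _ _) (i + 1)
    rw [hr] at this
    cases hfn : firstNoun w (i + 1) (min w.length (i + 5)) with
    | none => rw [hfn] at this; simp at this
    | some j' =>
      rw [hfn] at this
      simp only [Option.map_some] at this
      rw [bestFrom]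
      simp only [dif_pos h1]
      rw [hnum, hfn]
      simp only [Option.map_some, render]
      rw [hnum]
      simpa using this
  | case3 i h1 tok hget n hpn hr ih =>
    -- aInner found nothing
    have ht : w[i] = tok := by simpa [List.getElem?_eq_getElem h1] using hget
    have hnum : numAt w i = some n := by rw [numAt, tokAt_lt w i h1, ht, hpn]
    have := aInner_eq w n (min w.length (i + 5)) (min_le_left _ _) (i + 1)
    rw [hr] at this
    cases hfn : firstNoun w (i + 1) (min w.length (i + 5)) with
    | some j' => rw [hfn] at this; simp at this
    | none =>
      rw [bestFrom]
      simp only [dif_pos h1]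
      rw [hnum, hfn]
      exact ih
  | case4 i h1 hget =>
    simp [List.getElem?_eq_getElem h1] at hget
  | case5 i h1 =>
    rw [bestFrom]; simp [h1]

-- ----- the queue invariant -----
theorem mem_recentQ (w : List String) (j d k : Nat) (v : Int) :
    (k, v) ∈ recentQ w j d ↔ k < j ∧ j ≤ k + d ∧ numAt w k = some v := by
  simp only [recentQ, List.mem_filterMap, List.mem_range]
  constructor
  · rintro ⟨k', hk', h⟩
    by_cases hc : j ≤ k' + d
    · rw [if_pos hc] at h
      cases hmap : numAt w k' with
      | none => rw [hmap] at h; simp at h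
      | some v' =>
        rw [hmap] at h
        simp only [Option.map_some, Option.some.injEq, Prod.mk.injEq] at h
        obtain ⟨rfl, rfl⟩ := h
        exact ⟨hk', hc, hmap⟩
    · rw [if_neg hc] at h; simp at h
  · rintro ⟨h1, h2, h3⟩
    refine ⟨k, h1, ?_⟩
    rw [if_pos h2, h3]
    rfl

theorem recentQ_filter (w : List String) (j : Nat) :
    (recentQ w j 5).filter (fun kv => j ≤ kv.1 + 4) = recentQ w j 4 := by
  rw [recentQ, recentQ, List.filter_filterMap]
  apply List.filterMap_congr
  intro k hk
  by_cases hc : j ≤ k + 4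
  · rw [if_pos (by omega : j ≤ k + 5), if_pos hc]
    cases numAt w k <;> simp [Option.filter, hc]
  · rw [if_neg hc]
    by_cases hc5 : j ≤ k + 5
    · rw [if_pos hc5]; cases numAt w k <;> simp [Option.filter, hc]
    · rw [if_neg hc5]; simp

theorem recentQ_succ (w : List String) (j : Nat) :
    recentQ w (j + 1) 5 = recentQ w j 4 ++ ((numAt w j).map (fun v => (j, v))).toList := by
  rw [recentQ, List.range_succ, List.filterMap_append]
  congr 1
  · rw [recentQ]
    apply List.filterMap_congr
    intro k hk
    have hiff : (j + 1 ≤ k + 5) ↔ (j ≤ k + 4) := by omega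
    simp only [hiff]
  · cases h : numAt w j <;> simp [h]

theorem recentQ_head_min (w : List String) (j d k0 k : Nat) (v0 v : Int)
    (rest : List (Nat × Int)) (hq : recentQ w j d = (k0, v0) :: rest)
    (hk : (k, v) ∈ recentQ w j d) : k0 ≤ k := by
  have hkey : ∀ (a : Nat) (p : Nat × Int),
      (if j ≤ a + d then (numAt w a).map (fun v => (a, v)) else none) = some p → p.1 = a := by
    intro a p hp
    by_cases hc : j ≤ a + d
    · rw [if_pos hc] at hp
      cases hmap : numAt w a with
      | none => rw [hmap] at hp; simp at hp
      | some v' =>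
        rw [hmap] at hp
        simp only [Option.map_some, Option.some.injEq] at hp
        rw [← hp]
    · rw [if_neg hc] at hp; simp at hp
  have hp : (recentQ w j d).Pairwise (fun p q => p.1 < q.1) := by
    rw [recentQ, List.pairwise_filterMap]
    refine List.Pairwise.imp ?_ (List.pairwise_lt_range (n := j))
    intro a b hab x hx y hy
    rw [hkey a x hx, hkey b y hy]
    exact hab
  rw [hq] at hp hk
  rcases List.mem_cons.mp hk with heq | hmem
  · cases heq; exact le_refl _
  · exact le_of_lt ((List.pairwise_cons.mp hp).1 _ hmem)

-- ----- B's pass computes A's first pair -----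
theorem bGo_spec (w : List String) : ∀ n j q, w.length ≤ j + n → q = recentQ w j 5 →
    (∀ i t, t < j → ¬ validPair w i t) →
    bGo w q j = (bestFrom w 0).map (render w) := by
  intro n
  induction n with
  | zero =>
    intro j q hlen hq hprev
    rw [bGo, dif_neg (by omega : ¬ j < w.length)]
    rw [bestFrom_eq_none_intro w 0 ?_]
    · rfl
    · intro t _ hg
      obtain ⟨t', hv⟩ := valid_of_good w t hg
      have : t' < w.length := isNoun_lt w t' hv.2.1
      exact hprev t t' (by omega) hv
  | succ n ih =>
    intro j q hlen hq hprev
    by_cases hj : j < w.length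
    · have hget : PySem.List.pyGet? w (j : Int) = some w[j] := by
        simp [List.getElem?_eq_getElem hj]
      rw [bGo, dif_pos hj, hget]
      simp only []
      have hq4 : q.filter (fun kv => j ≤ kv.1 + 4) = recentQ w j 4 := by
        rw [hq, recentQ_filter]
      rw [hq4]
      cases hnoun : PySem.Set.contains nounsSet w[j] with
      | true =>
        simp only [if_true]
        cases hq4c : recentQ w j 4 with
        | nil =>
          simp only []
          apply ih (j + 1) [] (by omega) ?_ ?_
          · have hnum0 : numAt w j = none := by
              rw [numAt, tokAt_lt w j hj]; exact noun_not_num _ hnoun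
            rw [recentQ_succ, hnum0, hq4c]
            rfl
          · intro i t ht hv
            rcases Nat.lt_succ_iff_lt_or_eq.mp ht with h' | rfl
            · exact hprev i t h' hv
            · obtain ⟨hs, _, hij, hle4⟩ := hv
              obtain ⟨vv, hvv⟩ := Option.isSome_iff_exists.mp hs
              have hm : (i, vv) ∈ recentQ w t 4 := (mem_recentQ w t 4 i vv).mpr ⟨hij, by omega, hvv⟩
              rw [hq4c] at hm
              simp at hm
        | cons hd rest =>
          obtain ⟨k0, v0⟩ := hd
          simp only []
          have hmem0 : (k0, v0) ∈ recentQ w j 4 := by rw [hq4c]; exact List.mem_cons_self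
          obtain ⟨hk0j, hjk0, hnumk0⟩ := (mem_recentQ w j 4 k0 v0).mp hmem0
          have hnounj : isNoun w j = true := by rw [isNoun, tokAt_lt w j hj]; exact hnoun
          have hfn : firstNoun w (k0 + 1) (min w.length (k0 + 5)) = some j := by
            apply firstNoun_eq_some_intro w _ _ _ (by omega) (by omega) hnounj
            intro t ht1 ht2
            by_contra hcon
            rw [Bool.not_eq_false] at hcon
            exact hprev k0 t ht2 ⟨by simp [hnumk0], hcon, by omega, by omega⟩
          have hbest : bestFrom w 0 = some (k0, j) := by
            apply bestFrom_eq_some_intro w 0 k0 j (Nat.zero_le _) ?_ (by simp [hnumk0]) hfn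
            intro t _ htk0 hg
            obtain ⟨t', hv⟩ := valid_of_good w t hg
            obtain ⟨hs, hn', htt', hle4'⟩ := hv
            by_cases hc : j ≤ t + 4
            · obtain ⟨vv, hvv⟩ := Option.isSome_iff_exists.mp hs
              have hmem : (t, vv) ∈ recentQ w j 4 := (mem_recentQ w j 4 t vv).mpr ⟨by omega, hc, hvv⟩
              have := recentQ_head_min w j 4 k0 t v0 vv rest hq4c hmem
              omega
            · exact hprev t t' (by omega) ⟨hs, hn', htt', hle4'⟩
          rw [hbest]
          simp only [Option.map_some, render]
          rw [hnumk0, tokAt_lt w j hj]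
          simp
      | false =>
        simp only [Bool.false_eq_true, if_false]
        have hnumj : numAt w j = parseN w[j] := by rw [numAt, tokAt_lt w j hj]
        have hnounjf : isNoun w j = false := by rw [isNoun, tokAt_lt w j hj]; exact hnoun
        have hprev' : ∀ i t, t < j + 1 → ¬ validPair w i t := by
          intro i t ht hv
          rcases Nat.lt_succ_iff_lt_or_eq.mp ht with h' | rfl
          · exact hprev i t h' hv
          · rw [hv.2.1] at hnounjf; simp at hnounjf
        cases hpn : parseN w[j] with
        | some nn =>
          simp only []
          apply ih (j + 1) _ (by omega) ?_ hprev'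
          rw [recentQ_succ, hnumj, hpn]
          rfl
        | none =>
          simp only []
          apply ih (j + 1) _ (by omega) ?_ hprev'
          rw [recentQ_succ, hnumj, hpn]
          simp
    · rw [bGo, dif_neg hj]
      rw [bestFrom_eq_none_intro w 0 ?_]
      · rfl
      · intro t _ hg
        obtain ⟨t', hv⟩ := valid_of_good w t hg
        have : t' < w.length := isNoun_lt w t' hv.2.1
        exact hprev t t' (by omega) hv


-- ===== VERDICT (by name: the statement is the Claim_ definition above) =====
theorem extract_title_text_py_spec : Claim_equal_extract_title_text_py := by
  unfold Claim_equal_extract_title_text_py Spec_extract_title_text_py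
  intro tokens _
  unfold extract_title_text_py extract_title_text_py_alt
  simp only []
  set w := (PySem.List.slice tokens none (some 14)).filter (fun t => t ≠ "") with hw
  have hb : bGo w [] 0 = (bestFrom w 0).map (render w) :=
    bGo_spec w w.length 0 [] (by omega) rfl (fun i t ht => absurd ht (Nat.not_lt_zero t))
  by_cases hempty : w = []
  · rw [if_pos hempty, hempty, bGo]
    simp
  · rw [if_neg hempty, aOuter_eq w 0, hb]
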